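-- pv_equiv track=rewrite | github.com/Arisofia/loans-analytics | scripts/validation/validate_migration_order.py | validate_no_duplicates
-- ===== SOURCE A (Python) =====
-- from typing import List, Tuple
--
-- def validate_no_duplicates(migrations: List[str]) -> Tuple[bool, List[str]]:
--     """Validate that there are no duplicate migration names."""
--     errors = []
--     seen = set()
--     duplicates = []
--
--     for migration in migrations:
--         if migration in seen:
--             duplicates.append(migration)
--         seen.add(migration)
--
--     if duplicates:
--         errors.append(f"  Found {len(duplicates)} duplicate migration(s):")
--         for dup in sorted(set(duplicates)):
--             count = migrations.count(dup)
--             errors.append(f"    - {dup} (appears {count} times)")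
--
--     return len(errors) == 0, errors
-- ===== SOURCE B (Python) =====
-- from typing import List, Tuple
--
-- def validate_no_duplicates(migrations: List[str]) -> Tuple[bool, List[str]]:
--     """Validate that there are no duplicate migration names."""
--     lines = []
--     extras = 0
--     cur = None
--     cnt = 0
--     for name in sorted(migrations):
--         if name == cur:
--             cnt += 1
--         else:
--             if cnt > 1:
--                 extras += cnt - 1
--                 lines.append(f"    - {cur} (appears {cnt} times)")
--             cur = name
--             cnt = 1
--     if cnt > 1:
--         extras += cnt - 1
--         lines.append(f"    - {cur} (appears {cnt} times)")
--     if extras == 0: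
--         return True, []
--     return False, [f"  Found {extras} duplicate migration(s):"] + lines
-- ===== Notes on version B (the rewrite author's own statement) =====
-- stated objective: alternative
-- what changed: Replaced A's seen-set membership sweep plus per-duplicate migrations.count() rescans with a sort-then-scan: sort the list once and walk it grouping runs of equal adjacent names, emitting a line per run longer than one and summing the extra occurrences for the header.
import Mathlib
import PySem

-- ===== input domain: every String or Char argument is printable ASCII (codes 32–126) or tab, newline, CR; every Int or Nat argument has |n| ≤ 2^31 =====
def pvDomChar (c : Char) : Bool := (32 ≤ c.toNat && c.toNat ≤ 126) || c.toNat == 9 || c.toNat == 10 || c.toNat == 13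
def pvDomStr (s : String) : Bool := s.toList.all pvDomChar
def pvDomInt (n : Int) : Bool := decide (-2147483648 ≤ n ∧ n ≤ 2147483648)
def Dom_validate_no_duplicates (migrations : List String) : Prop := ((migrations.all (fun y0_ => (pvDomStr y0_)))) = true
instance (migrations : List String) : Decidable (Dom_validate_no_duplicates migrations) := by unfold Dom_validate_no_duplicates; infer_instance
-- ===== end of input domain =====

-- B sorts the list once and scans it grouping runs of equal adjacent names (no seen-set, no per-name recount);
-- same return value as A.

-- ===== PORT A =====
-- the body of A's first loop (seen, duplicates are the two accumulators)
def pvStepA (s : PySem.Set String × List String) (migration : String) : PySem.Set String × List String :=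
  (PySem.Set.add s.1 migration,
   if PySem.Set.contains s.1 migration then s.2 ++ [migration] else s.2)

def validate_no_duplicates (migrations : List String) : Bool × List String :=
  -- for migration in migrations: if migration in seen: duplicates.append(migration); seen.add(migration)
  let st := migrations.foldl pvStepA (PySem.Set.empty, [])
  let duplicates := st.2
  let errors : List String :=
    if duplicates ≠ [] then
      (PySem.List.sorted (PySem.Set.ofList duplicates) (fun x => x) false).foldl
        (fun acc dup =>
          acc ++ ["    - " ++ dup ++ " (appears "
                  ++ PySem.Int.toStr ((PySem.List.count migrations dup : Nat) : Int) ++ " times)"])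
        ["  Found " ++ PySem.Int.toStr ((duplicates.length : Nat) : Int) ++ " duplicate migration(s):"]
    else []
  (errors.length == 0, errors)

-- ===== PORT B =====
-- the report line for one duplicated name
def pvLine (c : String) (cnt : Int) : String :=
  "    - " ++ c ++ " (appears " ++ PySem.Int.toStr cnt ++ " times)"

-- the body of B's loop over the sorted list; state = (lines, extras, cur, cnt)
def pvStepB (st : List String × Int × Option String × Int) (name : String) :
    List String × Int × Option String × Int :=
  if some name = st.2.2.1 then (st.1, st.2.1, st.2.2.1, st.2.2.2 + 1)
  else if 1 < st.2.2.2 then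
    (st.1 ++ [pvLine (st.2.2.1.getD "") st.2.2.2], st.2.1 + (st.2.2.2 - 1), some name, 1)
  else (st.1, st.2.1, some name, 1)

-- the final flush after the loop ('if cnt > 1: …' at the end of Source B)
def pvFlush (st : List String × Int × Option String × Int) : List String × Int :=
  if 1 < st.2.2.2 then
    (st.1 ++ [pvLine (st.2.2.1.getD "") st.2.2.2], st.2.1 + (st.2.2.2 - 1))
  else (st.1, st.2.1)

def validate_no_duplicates_alt (migrations : List String) : Bool × List String :=
  let st := (PySem.List.sorted migrations (fun x => x) false).foldl pvStepB ([], 0, none, 0)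
  let fin := pvFlush st
  if fin.2 = 0 then (true, [])
  else (false, ("  Found " ++ PySem.Int.toStr fin.2 ++ " duplicate migration(s):") :: fin.1)

-- ===== PRECONDITION & SPEC =====
def Spec_validate_no_duplicates (migrations : List String) (out : Bool × List String) : Prop := out = validate_no_duplicates_alt migrations
instance (migrations : List String) (out : Bool × List String) : Decidable (Spec_validate_no_duplicates migrations out) := by unfold Spec_validate_no_duplicates; infer_instance

-- ===== CLAIM (what is proved, stated in full; the proofs are below) =====
def Claim_equal_validate_no_duplicates : Prop := ∀ (migrations : List String), Dom_validate_no_duplicates migrations → Spec_validate_no_duplicates migrations (validate_no_duplicates migrations)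

-- ===== LEMMAS AND PROOFS =====

-- what B's scan produces, stated on the multiset: lines for the distinct names occurring > 1 time,
-- extras = length minus number of distinct names
def pvTgtLines (u : List String) : List String :=
  ((PySem.List.dedup u).filter (fun v => decide (1 < u.count v))).map
    (fun v => pvLine v ((u.count v : Nat) : Int))

def pvTgtExtra (u : List String) : Int :=
  (u.length : Int) - ((PySem.List.dedup u).length : Int)

-- ---- A-side lemmas (A's loop collects exactly the names occurring ≥ 2 times) ----

theorem pvLoopA_fst (xs : List String) (seen : PySem.Set String) (dups : List String) :
    (xs.foldl pvStepA (seen, dups)).1 = PySem.Set.update seen xs := by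
  induction xs generalizing seen dups with
  | nil => simp [PySem.Set.update]
  | cons x t ih => simp [pvStepA, ih, PySem.Set.update_cons]

theorem pvLoopA_len (xs : List String) (seen : PySem.Set String) (dups : List String) :
    (xs.foldl pvStepA (seen, dups)).2.length + (xs.foldl pvStepA (seen, dups)).1.length
      = dups.length + seen.length + xs.length := by
  induction xs generalizing seen dups with
  | nil => simp
  | cons x t ih =>
    simp only [List.foldl_cons, pvStepA]
    by_cases hx : x ∈ seen
    · have hc : PySem.Set.contains seen x = true := (PySem.Set.contains_iff seen x).mpr hx
      rw [hc, if_pos rfl, PySem.Set.add_of_mem hx]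
      have := ih seen (dups ++ [x])
      simp only [List.length_append, List.length_cons, List.length_nil] at this ⊢
      omega
    · have hc : PySem.Set.contains seen x = false := by
        by_contra hcc
        exact hx ((PySem.Set.contains_iff seen x).mp (by simpa using hcc))
      rw [hc, if_neg (by simp), PySem.Set.add_of_not_mem hx]
      have := ih (seen ++ [x]) dups
      simp only [List.length_append, List.length_cons, List.length_nil] at this ⊢
      omega

theorem pvLoopA_mem (xs : List String) (seen : PySem.Set String) (dups : List String) (m : String) :
    m ∈ (xs.foldl pvStepA (seen, dups)).2
      ↔ m ∈ dups ∨ (m ∈ seen ∧ m ∈ xs) ∨ 2 ≤ xs.count m := by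
  induction xs generalizing seen dups with
  | nil => simp
  | cons x t ih =>
    simp only [List.foldl_cons, pvStepA]
    by_cases hx : x ∈ seen
    · have hc : PySem.Set.contains seen x = true := (PySem.Set.contains_iff seen x).mpr hx
      rw [hc, if_pos rfl, PySem.Set.add_of_mem hx, ih]
      by_cases hmx : m = x
      · subst hmx
        simp [hx, List.mem_append]
      · have hxm : ¬ x = m := fun h => hmx h.symm
        have hcnt : List.count m (x :: t) = List.count m t := by
          simp [hxm]
        simp only [List.mem_append, List.mem_cons, hcnt, hmx]
        tauto
    · have hc : PySem.Set.contains seen x = false := by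
        by_contra hcc
        exact hx ((PySem.Set.contains_iff seen x).mp (by simpa using hcc))
      rw [hc, if_neg (by simp), PySem.Set.add_of_not_mem hx, ih]
      by_cases hmx : m = x
      · subst hmx
        have e1 : (2 ≤ List.count m (m :: t)) ↔ m ∈ t := by
          rw [List.count_cons_self]
          exact ⟨fun h => List.count_pos_iff.mp (by omega),
                fun h => by have := List.count_pos_iff.mpr h; omega⟩
        have f : 2 ≤ List.count m t → m ∈ t := fun h => List.count_pos_iff.mp (by omega)
        simp only [List.mem_append, List.mem_cons, e1]
        simp [hx]
        tauto
      · have hxm : ¬ x = m := fun h => hmx h.symm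
        have hcnt : List.count m (x :: t) = List.count m t := by
          simp [hxm]
        simp only [List.mem_append, List.mem_cons, hcnt, hmx]
        tauto

theorem pvDups_mem (migrations : List String) (m : String) :
    m ∈ (migrations.foldl pvStepA (PySem.Set.empty, [])).2 ↔ 2 ≤ migrations.count m := by
  simpa [PySem.Set.empty] using pvLoopA_mem migrations [] [] m

theorem pvDups_len (migrations : List String) :
    ((migrations.foldl pvStepA (PySem.Set.empty, [])).2.length : Int)
      = (migrations.length : Int) - ((PySem.Set.ofList migrations).length : Int) := by
  have h := pvLoopA_len migrations [] []
  have hu : (migrations.foldl pvStepA (([] : PySem.Set String), ([] : List String))).1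
      = PySem.Set.ofList migrations := by
    rw [pvLoopA_fst]; exact PySem.Set.update_nil_left migrations
  rw [hu] at h
  simp [PySem.Set.empty] at h ⊢
  omega


-- ---- Set/dedup structure lemmas needed by B's run-scan ----

theorem pvUpdate_def (s : PySem.Set String) (l : List String) :
    PySem.Set.update s l = l.foldl PySem.Set.add s := rfl

theorem pvOfList_def (u : List String) : PySem.Set.ofList u = PySem.Set.update [] u := rfl

theorem pvSet_update_append (l : List String) (s r : PySem.Set String)
    (h : ∀ x ∈ l, x ∉ s) :
    PySem.Set.update (s ++ r) l = s ++ PySem.Set.update r l := by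
  induction l generalizing r with
  | nil => rfl
  | cons x l ih =>
    have hxs : x ∉ s := h x (List.mem_cons_self ..)
    have hadd : PySem.Set.add (s ++ r) x = s ++ PySem.Set.add r x := by
      rw [PySem.Set.add_eq_ite, PySem.Set.add_eq_ite]
      by_cases hr : x ∈ r
      · rw [if_pos (List.mem_append.mpr (Or.inr hr)), if_pos hr]
      · rw [if_neg (by simp [hxs, hr]), if_neg hr, List.append_assoc]
    rw [PySem.Set.update_cons, PySem.Set.update_cons, hadd,
      ih (PySem.Set.add r x) (fun y hy => h y (List.mem_cons_of_mem _ hy))]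

theorem pvSet_update_sublist (l : List String) (s : PySem.Set String) :
    (PySem.Set.update s l).Sublist (s ++ l) := by
  induction l generalizing s with
  | nil => simp [PySem.Set.update]
  | cons x l ih =>
    rw [PySem.Set.update_cons, PySem.Set.add_eq_ite]
    by_cases hx : x ∈ s
    · rw [if_pos hx]
      exact (ih s).trans ((List.sublist_cons_self x l).append_left s)
    · rw [if_neg hx]
      have := ih (s ++ [x])
      simpa [List.append_assoc] using this

theorem pvDedup_sublist (u : List String) : (PySem.List.dedup u).Sublist u := by
  have : PySem.List.dedup u = PySem.Set.update [] u := by simp [PySem.Set.ofList_eq_foldl, PySem.Set.update]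
  rw [this]
  simpa using pvSet_update_sublist u []

theorem pvSet_update_rep (j : Nat) (c : String) :
    PySem.Set.update [c] (List.replicate j c) = [c] := by
  induction j with
  | zero => rfl
  | succ j ih =>
    rw [List.replicate_succ, PySem.Set.update_cons,
      PySem.Set.add_of_mem (by simp), ih]

theorem pvOfList_replicate (k : Nat) (c : String) (hk : 1 ≤ k) :
    PySem.Set.ofList (List.replicate k c) = [c] := by
  obtain ⟨j, rfl⟩ : ∃ j, k = j + 1 := ⟨k - 1, by omega⟩
  rw [List.replicate_succ]
  have h1 : PySem.Set.ofList (c :: List.replicate j c)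
      = PySem.Set.update (PySem.Set.add [] c) (List.replicate j c) := by
    rw [pvOfList_def, PySem.Set.update_cons]
  rw [h1, PySem.Set.add_of_not_mem (by simp), List.nil_append, pvSet_update_rep]

theorem pvDedup_replicate_append (k : Nat) (c : String) (l : List String)
    (hk : 1 ≤ k) (hcl : c ∉ l) :
    PySem.List.dedup (List.replicate k c ++ l) = c :: PySem.List.dedup l := by
  have h1 : PySem.List.dedup (List.replicate k c ++ l)
      = PySem.Set.update (PySem.Set.ofList (List.replicate k c)) l := by
    show PySem.Set.ofList _ = _
    rw [pvOfList_def, pvOfList_def]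
    simp only [pvUpdate_def, List.foldl_append]
  rw [h1, pvOfList_replicate k c hk]
  have h2 : ([c] : List String) = [c] ++ [] := by simp
  rw [h2, pvSet_update_append l [c] [] (fun x hx => by
    simp only [List.mem_singleton]
    exact fun he => hcl (he ▸ hx))]
  rw [← pvOfList_def]
  rfl

theorem pvTgt_step (k : Nat) (c : String) (l : List String) (hk : 1 ≤ k) (hcl : c ∉ l) :
    pvTgtLines (List.replicate k c ++ l)
        = (if 1 < k then [pvLine c ((k : Nat) : Int)] else []) ++ pvTgtLines l
      ∧ pvTgtExtra (List.replicate k c ++ l) = ((k : Int) - 1) + pvTgtExtra l := by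
  have hd := pvDedup_replicate_append k c l hk hcl
  have hcc : (List.replicate k c ++ l).count c = k := by
    rw [List.count_append, List.count_replicate_self,
      List.count_eq_zero.mpr hcl]
    omega
  have hcv : ∀ v ∈ PySem.List.dedup l, (List.replicate k c ++ l).count v = l.count v := by
    intro v hv
    have hvl : v ∈ l := (PySem.List.mem_dedup ..).mp hv
    have hvc : v ≠ c := fun he => hcl (he ▸ hvl)
    rw [List.count_append, List.count_replicate, if_neg (by simpa using Ne.symm hvc)]
    simp
  constructor
  · unfold pvTgtLines
    rw [hd, List.filter_cons]
    have hfc : (PySem.List.dedup l).filter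
          (fun v => decide (1 < (List.replicate k c ++ l).count v))
        = (PySem.List.dedup l).filter (fun v => decide (1 < l.count v)) := by
      apply List.filter_congr
      intro v hv
      rw [hcv v hv]
    by_cases h2 : 1 < k
    · rw [if_pos (by simpa [hcc] using h2), if_pos h2, hfc, List.map_cons, hcc,
        List.singleton_append]
      congr 1
      apply List.map_congr_left
      intro v hv
      rw [hcv v (List.mem_of_mem_filter hv)]
    · rw [if_neg (by simpa [hcc] using h2), if_neg h2, hfc, List.nil_append]
      apply List.map_congr_left
      intro v hv
      rw [hcv v (List.mem_of_mem_filter hv)]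
  · unfold pvTgtExtra
    rw [hd]
    simp only [List.length_append, List.length_replicate, List.length_cons]
    push_cast
    omega

-- ---- B's loop over a sorted list computes pvTgt ----

theorem pvTgtLines_nil : pvTgtLines [] = [] := rfl

theorem pvTgtExtra_nil : pvTgtExtra [] = 0 := by decide

theorem pvFoldB (s : List String) (lines : List String) (extras : Int) (c : String) (k : Nat)
    (hk : 1 ≤ k) (hs : s.Pairwise (· ≤ ·)) (hc : ∀ x ∈ s, c ≤ x) :
    pvFlush (s.foldl pvStepB (lines, extras, some c, (k : Int)))
      = (lines ++ pvTgtLines (List.replicate k c ++ s),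
         extras + pvTgtExtra (List.replicate k c ++ s)) := by
  induction s generalizing lines extras c k with
  | nil =>
    obtain ⟨h1, h2⟩ := pvTgt_step k c [] hk (by simp)
    rw [List.foldl_nil, h1, h2, pvTgtLines_nil, pvTgtExtra_nil]
    by_cases h2k : 1 < k
    · have h2ki : (1 : Int) < (k : Int) := by exact_mod_cast h2k
      simp [pvFlush, h2ki, h2k]
    · have hk1 : k = 1 := by omega
      subst hk1
      norm_num [pvFlush]
  | cons x t ih =>
    rw [List.foldl_cons]
    by_cases hxc : x = c
    · subst hxc
      have hstep : pvStepB (lines, extras, some x, (k : Int)) x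
          = (lines, extras, some x, (k : Int) + 1) := by
        simp [pvStepB]
      have hcast : ((k : Int) + 1) = ((k + 1 : Nat) : Int) := by push_cast; ring
      rw [hstep, hcast,
        ih lines extras x (k + 1) (by omega) hs.of_cons
          (fun y hy => hc y (List.mem_cons_of_mem _ hy))]
      rw [List.replicate_succ', List.append_assoc, List.singleton_append]
    · have hcx : c < x := lt_of_le_of_ne (hc x (List.mem_cons_self ..)) (fun h => hxc h.symm)
      have hcnot : c ∉ x :: t := by
        intro hmem
        rcases List.mem_cons.mp hmem with he | ht
        · exact hxc he.symm
        · exact absurd (List.rel_of_pairwise_cons hs ht) (not_le.mpr hcx)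
      obtain ⟨h1, h2⟩ := pvTgt_step k c (x :: t) hk hcnot
      have hone : List.replicate 1 x ++ t = x :: t := by simp
      have hne : ¬ (some x = some c) := by simpa using hxc
      by_cases h2k : 1 < k
      · have h2ki : (1 : Int) < (k : Int) := by exact_mod_cast h2k
        have hstep : pvStepB (lines, extras, some c, (k : Int)) x
            = (lines ++ [pvLine c (k : Int)], extras + ((k : Int) - 1), some x, 1) := by
          simp [pvStepB, hne, h2ki]
        have hfold := ih (lines ++ [pvLine c (k : Int)]) (extras + ((k : Int) - 1)) x 1
          (by omega) hs.of_cons (fun y hy => List.rel_of_pairwise_cons hs hy)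
        rw [hone] at hfold
        simp only [Nat.cast_one] at hfold
        rw [hstep, hfold, h1, h2, if_pos h2k]
        simp only [Prod.mk.injEq]
        constructor
        · simp [List.append_assoc]
        · ring
      · have hk1 : k = 1 := by omega
        subst hk1
        have hstep : pvStepB (lines, extras, some c, ((1 : Nat) : Int)) x
            = (lines, extras, some x, 1) := by
          simp [pvStepB, hne]
        have hfold := ih lines extras x 1
          (by omega) hs.of_cons (fun y hy => List.rel_of_pairwise_cons hs hy)
        rw [hone] at hfold
        simp only [Nat.cast_one] at hfold
        rw [hstep, hfold, h1, h2, if_neg h2k]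
        norm_num

-- B's port evaluated: sort, run-scan, flush
theorem pvAltEq (migrations : List String) :
    validate_no_duplicates_alt migrations =
      (if pvTgtExtra (PySem.List.sorted migrations (fun x => x) false) = 0 then ((true : Bool), ([] : List String))
       else (false,
         ("  Found " ++ PySem.Int.toStr (pvTgtExtra (PySem.List.sorted migrations (fun x => x) false))
           ++ " duplicate migration(s):") :: pvTgtLines (PySem.List.sorted migrations (fun x => x) false))) := by
  rcases hs : PySem.List.sorted migrations (fun x => x) false with _ | ⟨x, t⟩
  · simp [validate_no_duplicates_alt, hs, pvFlush, pvTgtExtra_nil]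
  · have hpw : (x :: t).Pairwise (· ≤ ·) := by
      rw [← hs]
      simpa using PySem.List.sorted_pairwise (xs := migrations) (key := fun y => y)
    have h1 := pvFoldB t [] 0 x 1 (by omega) hpw.of_cons
      (fun y hy => List.rel_of_pairwise_cons hpw hy)
    simp only [Nat.cast_one] at h1
    have hone : List.replicate 1 x ++ t = x :: t := by simp
    rw [hone] at h1
    have hstep0 : pvStepB ([], 0, none, 0) x = ([], 0, some x, 1) := by
      simp [pvStepB]
    simp only [validate_no_duplicates_alt, hs, List.foldl_cons, hstep0, h1]
    simp

-- ===== VERDICT (by name: the statement is the Claim_ definition above) =====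
theorem validate_no_duplicates_spec : Claim_equal_validate_no_duplicates := by
  intro migrations _
  show validate_no_duplicates migrations = validate_no_duplicates_alt migrations
  rw [pvAltEq]
  have hperm : (PySem.List.sorted migrations (fun x => x) false).Perm migrations :=
    PySem.List.sorted_perm ..
  have hpw : (PySem.List.sorted migrations (fun x => x) false).Pairwise (· ≤ ·) := by
    simpa using PySem.List.sorted_pairwise (xs := migrations) (key := fun y => y)
  have hlen : ((migrations.foldl pvStepA (PySem.Set.empty, [])).2.length : Int)
      = pvTgtExtra (PySem.List.sorted migrations (fun x => x) false) := by
    rw [pvDups_len]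
    unfold pvTgtExtra
    have hp : (PySem.List.dedup (PySem.List.sorted migrations (fun x => x) false)).Perm
        (PySem.Set.ofList migrations) := by
      refine (List.perm_ext_iff_of_nodup (PySem.List.nodup_dedup _) (PySem.Set.nodup_ofList _)).mpr ?_
      intro v
      rw [PySem.List.mem_dedup, PySem.Set.mem_ofList, hperm.mem_iff]
    rw [hp.length_eq, hperm.length_eq]
  have hnames : PySem.List.sorted
        (PySem.Set.ofList (migrations.foldl pvStepA (PySem.Set.empty, [])).2) (fun x => x) false
      = (PySem.List.dedup (PySem.List.sorted migrations (fun x => x) false)).filter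
          (fun v => decide (1 < (PySem.List.sorted migrations (fun x => x) false).count v)) := by
    apply PySem.List.sorted_eq_of_perm_of_pairwise_lt
    · refine (List.perm_ext_iff_of_nodup
        ((PySem.List.nodup_dedup _).filter _) (PySem.Set.nodup_ofList _)).mpr ?_
      intro v
      rw [List.mem_filter, PySem.List.mem_dedup, PySem.Set.mem_ofList, pvDups_mem]
      rw [hperm.mem_iff, hperm.count_eq]
      constructor
      · rintro ⟨hv, hcnt⟩
        simp only [decide_eq_true_eq] at hcnt
        omega
      · intro h
        refine ⟨List.count_pos_iff.mp (by omega), ?_⟩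
        simp only [decide_eq_true_eq]
        omega
    · have hsub : ((PySem.List.dedup (PySem.List.sorted migrations (fun x => x) false)).filter
            (fun v => decide (1 < (PySem.List.sorted migrations (fun x => x) false).count v))).Sublist
          (PySem.List.sorted migrations (fun x => x) false) :=
        List.filter_sublist.trans (pvDedup_sublist _)
      have hle := hpw.sublist hsub
      have hnd : ((PySem.List.dedup (PySem.List.sorted migrations (fun x => x) false)).filter
          (fun v => decide (1 < (PySem.List.sorted migrations (fun x => x) false).count v))).Nodup :=
        (PySem.List.nodup_dedup _).filter _
      exact (hle.and hnd).imp (fun h => lt_of_le_of_ne h.1 h.2)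
  simp only [validate_no_duplicates]
  by_cases hd : (migrations.foldl pvStepA (PySem.Set.empty, [])).2 = []
  · have h0 : pvTgtExtra (PySem.List.sorted migrations (fun x => x) false) = 0 := by
      rw [← hlen, hd]
      simp
    rw [if_pos h0]
    simp only [hd]
    simp
  · have hne0 : ¬ pvTgtExtra (PySem.List.sorted migrations (fun x => x) false) = 0 := by
      rw [← hlen]
      intro h
      apply hd
      have hl0 : (migrations.foldl pvStepA (PySem.Set.empty, [])).2.length = 0 := by
        exact_mod_cast h
      exact List.length_eq_zero_iff.mp hl0
    rw [if_neg hne0, if_pos hd, PySem.List.foldl_append_singleton_eq_map, hnames, ← hlen]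
    have hmap : ((PySem.List.dedup (PySem.List.sorted migrations (fun x => x) false)).filter
          (fun v => decide (1 < (PySem.List.sorted migrations (fun x => x) false).count v))).map
        (fun dup => "    - " ++ dup ++ " (appears "
          ++ PySem.Int.toStr ((PySem.List.count migrations dup : Nat) : Int) ++ " times)")
        = pvTgtLines (PySem.List.sorted migrations (fun x => x) false) := by
      unfold pvTgtLines
      apply List.map_congr_left
      intro v _
      rw [pvLine, PySem.List.count_eq, hperm.count_eq]
    rw [hmap]
    simp
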